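-- pv_equiv track=rewrite | github.com/Dinis-Esteves/Proj-FP-24 | Project_1/FP2324P1.py | ordena_intersecoes
-- ===== SOURCE A (Python) =====
-- def ordena_intersecoes(tup_inter):
--     """Esta funcao ordena primeiramente por letra todas as intersecoes e de seguida corre varias vezes o codigo
--     colocando em cada loop os numeros correspondentes no tuple res, retornando-o quando tiver o mesmo tamanho que o original
--
--     ordena_intersecoes(tuple) --> tuple"""
--     res = ()
--     n = 1
--     while len(tup_inter) != len(res):
--         for i in sorted(tup_inter):
--             if i[1] == n:
--                 res += (i,)
--         n += 1
--     return res
-- ===== SOURCE B (Python) =====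
-- def ordena_intersecoes(tup_inter):
--     """Group the intersections by number in one pass, then emit each number's
--     bucket (letters sorted) for n = 1 .. max(number)."""
--     buckets = {}
--     for letra, num in tup_inter:
--         buckets.setdefault(num, []).append(letra)
--     if not buckets:
--         return ()
--     res = ()
--     for n in range(1, max(buckets) + 1):
--         for letra in sorted(buckets.get(n, ())):
--             res += ((letra, n),)
--     return res
-- ===== Notes on version B (the rewrite author's own statement) =====
-- stated objective: alternative
-- what changed: B replaces A's loop that re-sorts the whole tuple and re-scans it once per number value with a single grouping pass into a dict of per-number letter buckets followed by one emit pass over n = 1..max(number) sorting each small bucket.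
import Mathlib
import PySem

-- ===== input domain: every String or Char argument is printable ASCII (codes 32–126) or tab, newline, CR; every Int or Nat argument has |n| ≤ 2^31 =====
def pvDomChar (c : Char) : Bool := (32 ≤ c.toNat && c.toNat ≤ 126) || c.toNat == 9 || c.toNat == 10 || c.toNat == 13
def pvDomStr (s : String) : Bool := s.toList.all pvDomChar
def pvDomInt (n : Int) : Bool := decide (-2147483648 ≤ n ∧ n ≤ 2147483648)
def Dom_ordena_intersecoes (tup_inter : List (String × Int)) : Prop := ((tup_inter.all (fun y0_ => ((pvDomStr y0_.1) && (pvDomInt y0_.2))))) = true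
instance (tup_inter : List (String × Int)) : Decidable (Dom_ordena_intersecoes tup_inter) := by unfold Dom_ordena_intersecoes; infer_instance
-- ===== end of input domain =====

-- B groups the intersections by number in one dict pass and emits n = 1..max(number) once,
-- instead of A's re-sort + full re-scan of the tuple for every number value (objective: alternative).

-- ===== PORT A =====
-- A's 'while len(tup_inter) != len(res)' loop; the fuel argument (max number + 1 iterations)
-- is a totality guard only: under Pre_ the Python loop always exits within that many rounds.
def pvLoopA (tup : List (String × Int)) (res : List (String × Int)) (n : Int) :
    Nat → List (String × Int)
  | 0 => res
  | fuel + 1 =>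
    if tup.length = res.length then res
    else
      pvLoopA tup
        ((PySem.List.sorted2 tup (fun i => i.1) (fun i => i.2)).foldl
          (fun acc i => if i.2 == n then acc ++ [i] else acc) res)
        (n + 1) fuel

def ordena_intersecoes (tup_inter : List (String × Int)) : List (String × Int) :=
  pvLoopA tup_inter [] 1 ((tup_inter.foldl (fun m (t : String × Int) => max m t.2) 0).toNat + 1)

-- ===== PORT B =====
def ordena_intersecoes_alt (tup_inter : List (String × Int)) : List (String × Int) :=
  let buckets :=
    tup_inter.foldl (fun d t => d.modify t.2 [] (fun l => l ++ [t.1])) PySem.Dict.empty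
  match PySem.List.max? buckets.keys (fun x => x) with
  | none => []  -- 'if not buckets: return ()'
  | some mx =>
    (PySem.List.pyRange 1 (mx + 1)).foldl
      (fun res n =>
        (PySem.List.sorted (buckets.getD n []) (fun x => x)).foldl
          (fun acc letra => acc ++ [(letra, n)]) res)
      []

-- ===== PRECONDITION & SPEC =====
-- Pre_ excludes inputs containing a number < 1: on those A's while-loop never terminates
-- (n only counts up from 1, so such an entry is never collected and the lengths never match).
def Pre_ordena_intersecoes (tup_inter : List (String × Int)) : Prop :=
  ∀ t ∈ tup_inter, 1 ≤ t.2
instance (tup_inter : List (String × Int)) : Decidable (Pre_ordena_intersecoes tup_inter) := by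
  unfold Pre_ordena_intersecoes; infer_instance

def pvWitness_ordena_intersecoes : (List (String × Int)) := [("B", 2), ("A", 1), ("A", 2)]

def Spec_ordena_intersecoes (tup_inter : List (String × Int)) (out : List (String × Int)) : Prop :=
  out = ordena_intersecoes_alt tup_inter
instance (tup_inter : List (String × Int)) (out : List (String × Int)) :
    Decidable (Spec_ordena_intersecoes tup_inter out) := by
  unfold Spec_ordena_intersecoes; infer_instance

-- ===== CLAIM (what is proved, stated in full; the proofs are below) =====
def Claim_equal_ordena_intersecoes : Prop :=
  ∀ (tup_inter : List (String × Int)), Dom_ordena_intersecoes tup_inter →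
    Pre_ordena_intersecoes tup_inter →
    Spec_ordena_intersecoes tup_inter (ordena_intersecoes tup_inter)

-- ===== LEMMAS AND PROOFS =====

-- the entries with number n, as A collects them (filtered from the lexicographically sorted tuple)
def pvBucketA (tup : List (String × Int)) (n : Int) : List (String × Int) :=
  (PySem.List.sorted2 tup (fun i => i.1) (fun i => i.2)).filter (fun i => i.2 == n)

def pvBucketB (tup : List (String × Int)) (n : Int) : List (String × Int) :=
  (PySem.List.sorted ((tup.filter (fun t => t.2 == n)).map (fun t => t.1)) (fun x => x)).map
    (fun l => (l, n))

-- Python's sort of (letter, number) pairs is the sort by the lexicographic product key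
theorem pvSorted2_eq_lex (xs : List (String × Int)) :
    PySem.List.sorted2 xs (fun i => i.1) (fun i => i.2) =
      PySem.List.sorted xs (fun i => toLex (i.1, i.2)) := by
  show xs.foldl (fun acc x => PySem.List.insertBy
      (fun a b => decide (a.1 < b.1) || (!decide (b.1 < a.1) && decide (a.2 < b.2))) x acc) []
    = xs.foldl (fun acc x => PySem.List.insertBy
      (fun a b => decide (toLex (a.1, a.2) < toLex (b.1, b.2))) x acc) []
  congr 1
  funext acc x
  congr 1
  funext a b
  rcases lt_trichotomy a.1 b.1 with h | h | h
  · simp [Prod.Lex.lt_iff, h]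
  · simp [Prod.Lex.lt_iff, h]
  · simp [Prod.Lex.lt_iff, h, h.not_gt, h.ne']

-- the two bucket shapes agree: A's filter of the pair-sorted tuple = B's sorted letters re-paired
theorem pvBucket_eq (tup : List (String × Int)) (n : Int) :
    pvBucketA tup n = pvBucketB tup n := by
  unfold pvBucketA pvBucketB
  rw [pvSorted2_eq_lex]
  set p : String × Int → Bool := fun t => t.2 == n with hp
  have hperm1 : ((PySem.List.sorted tup (fun i => toLex (i.1, i.2))).filter p).Perm
      (tup.filter p) := (PySem.List.sorted_perm tup _ false).filter p
  have hmapid : ((tup.filter p).map (fun t => t.1)).map (fun l => (l, n)) = tup.filter p := by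
    rw [List.map_map]
    apply List.map_congr_left ?_ |>.trans (List.map_id _)
    intro t ht
    have h2 : t.2 = n := by
      have := List.of_mem_filter ht
      simpa [hp] using this
    exact Prod.ext rfl h2.symm
  have hperm2 : ((PySem.List.sorted ((tup.filter p).map (fun t => t.1)) (fun x => x)).map
      (fun l => (l, n))).Perm (tup.filter p) := by
    have hstep := (PySem.List.sorted_perm ((tup.filter p).map (fun t => t.1))
      (fun x => x) false).map (fun l => (l, n))
    rw [hmapid] at hstep
    exact hstep
  apply List.Perm.eq_of_pairwise (le := fun a b => a.1 ≤ b.1)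
  · intro a b ha hb h1 h2
    have ha2 : a.2 = n := by
      have := List.of_mem_filter ha; simpa [hp] using this
    have hb2 : b.2 = n := by
      rcases List.mem_map.mp hb with ⟨l, _, rfl⟩; rfl
    exact Prod.ext (le_antisymm h1 h2) (ha2.trans hb2.symm)
  · refine List.Pairwise.imp ?_ ((PySem.List.sorted_pairwise tup
      (fun i => toLex (i.1, i.2))).filter p)
    intro a b hab
    rcases Prod.Lex.le_iff.mp hab with h | h
    · exact le_of_lt h
    · exact le_of_eq h.1
  · rw [List.pairwise_map]
    exact PySem.List.sorted_pairwise _ (fun x => x)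
  · exact hperm1.trans hperm2.symm

theorem pvCountP_split (l : List (String × Int)) (n : Int) :
    l.countP (fun t => n ≤ t.2) =
      l.countP (fun t => t.2 == n) + l.countP (fun t => n + 1 ≤ t.2) := by
  induction l with
  | nil => simp
  | cons a l ih =>
    simp only [List.countP_cons, ih]
    by_cases h : a.2 = n
    · simp [h]; omega
    · by_cases h2 : n + 1 ≤ a.2
      · have : n ≤ a.2 := by omega
        simp [h, h2, this]; omega
      · by_cases h3 : n ≤ a.2
        · omega
        · simp [h, h2, h3]

-- A's while-loop appends bucket n and moves to n+1 until the lengths match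
theorem pvLoopA_run (tup : List (String × Int)) :
    ∀ (fuel : Nat) (n : Int) (res : List (String × Int)),
      res.length + tup.countP (fun t => n ≤ t.2) = tup.length →
      (∀ t ∈ tup, t.2 < n + fuel) →
      pvLoopA tup res n fuel =
        res ++ (PySem.List.pyRange n (n + fuel)).flatMap (pvBucketA tup) := by
  intro fuel
  induction fuel with
  | zero =>
    intro n res hc hb
    simp [pvLoopA, PySem.List.pyRange]
  | succ fuel ih =>
    intro n res hc hb
    rw [pvLoopA]
    push_cast
    by_cases hlen : tup.length = res.length
    · rw [if_pos hlen]
      have hz : tup.countP (fun t => n ≤ t.2) = 0 := by omega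
      have hnone : ∀ t ∈ tup, ¬ (n ≤ t.2) := by
        intro t ht
        have := List.countP_eq_zero.mp hz t ht
        simpa using this
      have hempty : ∀ k ∈ PySem.List.pyRange n (n + (fuel : Int) + 1), pvBucketA tup k = [] := by
        intro k hk
        have hnk : n ≤ k := (PySem.List.mem_pyRange_one.mp hk).1
        unfold pvBucketA
        rw [List.filter_eq_nil_iff]
        intro t ht
        have htm : t ∈ tup := ((PySem.List.sorted2_perm tup _ _ false).mem_iff).mp ht
        have := hnone t htm
        simp only [beq_iff_eq]
        intro he
        omega
      rw [show n + ((fuel : Int) + 1) = n + (fuel : Int) + 1 by ring,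
        List.flatMap_eq_nil_iff.mpr hempty, List.append_nil]
    · rw [if_neg hlen]
      rw [PySem.List.foldl_append_if_eq_filter]
      have hc' : (res ++ (pvBucketA tup n)).length + tup.countP (fun t => n + 1 ≤ t.2) = tup.length := by
        have hsplit := pvCountP_split tup n
        have hlb : (pvBucketA tup n).length = tup.countP (fun t => t.2 == n) := by
          unfold pvBucketA
          rw [← List.countP_eq_length_filter]
          exact List.Perm.countP_eq _ (PySem.List.sorted2_perm tup _ _ false)
        rw [List.length_append, hlb]
        omega
      have hb' : ∀ t ∈ tup, t.2 < (n + 1) + fuel := by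
        intro t ht; have := hb t ht; omega
      have := ih (n + 1) (res ++ pvBucketA tup n) hc' hb'
      show pvLoopA tup (res ++ (PySem.List.sorted2 tup (fun i => i.1) (fun i => i.2)).filter (fun i => i.2 == n)) (n + 1) fuel = _
      rw [show ((PySem.List.sorted2 tup (fun i => i.1) (fun i => i.2)).filter (fun i => i.2 == n)) = pvBucketA tup n from rfl]
      rw [this]
      have hrange : PySem.List.pyRange n (n + ((fuel : Int) + 1)) = n :: PySem.List.pyRange (n + 1) (n + 1 + (fuel : Int)) := by
        rw [PySem.List.pyRange_one_cons (by omega),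
          show n + ((fuel : Int) + 1) = n + 1 + (fuel : Int) by ring]
      rw [hrange, List.flatMap_cons, List.append_assoc]

theorem pv_main (tup : List (String × Int)) (hpre : ∀ t ∈ tup, 1 ≤ t.2) :
    ordena_intersecoes tup = ordena_intersecoes_alt tup := by
  rcases eq_or_ne tup [] with rfl | hne
  · rfl
  · set M : Int := tup.foldl (fun m (t : String × Int) => max m t.2) 0 with hM
    have hmax0 := PySem.List.le_foldl_max_int tup (fun t => t.2) 0
    rw [← hM] at hmax0
    have hM0 : 0 ≤ M := hmax0.1
    have hub : ∀ t ∈ tup, t.2 ≤ M := hmax0.2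
    -- A side
    have hA : ordena_intersecoes tup =
        (PySem.List.pyRange 1 (M + 1)).flatMap (pvBucketA tup) := by
      unfold ordena_intersecoes
      rw [← hM]
      rw [pvLoopA_run tup (M.toNat + 1) 1 []]
      · have hcast : (1 : Int) + ((M.toNat + 1 : Nat) : Int) = (M + 1) + 1 := by omega
        rw [hcast, List.nil_append,
          PySem.List.pyRange_one_succ_right (by omega), List.flatMap_append]
        have hbe : pvBucketA tup (M + 1) = [] := by
          unfold pvBucketA
          rw [List.filter_eq_nil_iff]
          intro t ht
          have htm : t ∈ tup := ((PySem.List.sorted2_perm tup _ _ false).mem_iff).mp ht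
          have := hub t htm
          simp only [beq_iff_eq]
          intro he; omega
        simp [hbe]
      · rw [List.length_nil, Nat.zero_add]
        apply List.countP_eq_length.mpr
        intro t ht
        simpa using hpre t ht
      · intro t ht
        have := hub t ht
        omega
    -- B side
    have hKeys : (tup.foldl (fun d t => d.modify t.2 [] (fun l => l ++ [t.1]))
        PySem.Dict.empty).keys = PySem.Set.ofList (tup.map (fun t => t.2)) := by
      rw [PySem.Dict.keys_foldl_modify_key tup (fun t => t.2) [] (fun _ t => fun l => l ++ [t.1])]
      simp [PySem.Set.update_nil_left]
    have hGetD : ∀ k : Int, (tup.foldl (fun d t => d.modify t.2 [] (fun l => l ++ [t.1]))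
        PySem.Dict.empty).getD k [] = (tup.filter (fun t => t.2 == k)).map (fun t => t.1) := by
      intro k
      have hfm : tup.foldl (fun d t => d.modify t.2 [] (fun l => l ++ [t.1])) PySem.Dict.empty
          = (tup.map (fun t => (t.2, t.1))).foldl
              (fun d p => d.modify p.1 [] (fun l => l ++ [p.2])) PySem.Dict.empty := by
        rw [List.foldl_map]
      rw [hfm, PySem.Dict.getD_foldl_modify_append, List.filter_map, List.map_map]
      simp only [PySem.Dict.getD_empty, List.nil_append]
      rfl
    have hmax : PySem.List.max? (tup.foldl (fun d t => d.modify t.2 [] (fun l => l ++ [t.1]))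
        PySem.Dict.empty).keys (fun x => x) = some M := by
      rw [hKeys]
      obtain ⟨t0, ht0⟩ := List.exists_mem_of_ne_nil tup hne
      have hne2 : PySem.Set.ofList (tup.map (fun t => t.2)) ≠ [] :=
        List.ne_nil_of_mem ((PySem.Set.mem_ofList _ _).mpr (List.mem_map_of_mem ht0))
      cases h : PySem.List.max? (PySem.Set.ofList (tup.map (fun t => t.2))) (fun x => x) with
      | none => exact absurd ((PySem.List.max?_eq_none_iff _ _).mp h) hne2
      | some m =>
        have hm_mem : m ∈ tup.map (fun t => t.2) :=
          (PySem.Set.mem_ofList _ _).mp (PySem.List.max?_mem h)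
        rcases List.mem_map.mp hm_mem with ⟨t, htm, rfl⟩
        have h1 : t.2 ≤ M := hub t htm
        have h2 : M ≤ t.2 := by
          have hfold : M = (tup.map (fun t => t.2)).foldl max 0 := by
            rw [hM, List.foldl_map]
          rcases PySem.List.foldl_max_mem (tup.map (fun t => t.2)) 0 with h0 | hmem
          · rw [← hfold] at h0
            have := hpre t htm
            omega
          · rw [← hfold] at hmem
            exact PySem.List.max?_isMax h M ((PySem.Set.mem_ofList _ _).mpr hmem)
        rw [le_antisymm h1 h2]
    have hB : ordena_intersecoes_alt tup =
        (PySem.List.pyRange 1 (M + 1)).flatMap (pvBucketB tup) := by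
      unfold ordena_intersecoes_alt
      simp only [hmax]
      simp only [PySem.List.foldl_append_singleton_eq_map, hGetD]
      rw [PySem.List.foldl_append_eq_flatMap, List.nil_append]
      rfl
    rw [hA, hB]
    congr 1
    funext n
    exact pvBucket_eq tup n

-- ===== VERDICT (by name: the statement is the Claim_ definition above) =====
theorem ordena_intersecoes_spec : Claim_equal_ordena_intersecoes := by
  intro tup_inter _ hpre
  unfold Spec_ordena_intersecoes
  exact pv_main tup_inter hpre
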